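-- pv_equiv track=rewrite | github.com/yaolisi/perilla | backend/scripts/event_bus_smoke_contract_guard_summary.py | parse_guard_log_text
-- ===== SOURCE A (Python) =====
-- from typing import Dict, List, Mapping, Tuple
--
-- GUARD_SECTIONS: Tuple[str, ...] = ("preflight", "mapping", "payload", "validator", "workflow")
--
-- def parse_guard_log_text(text: str, sections: Tuple[str, ...] = GUARD_SECTIONS) -> Dict[str, str]:
--     status = dict.fromkeys(sections, "missing")
--     for raw_line in text.splitlines():
--         line = raw_line.strip()
--         for section in sections:
--             if line == f"[guard] {section}":
--                 status[section] = "seen"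
--     return status
-- ===== SOURCE B (Python) =====
-- from typing import Dict, Tuple
--
-- GUARD_SECTIONS: Tuple[str, ...] = ("preflight", "mapping", "payload", "validator", "workflow")
--
-- def parse_guard_log_text(text: str, sections: Tuple[str, ...] = GUARD_SECTIONS) -> Dict[str, str]:
--     observed = {line.strip() for line in text.splitlines()}
--     return {section: ("seen" if f"[guard] {section}" in observed else "missing")
--             for section in sections}
-- ===== Notes on version B (the rewrite author's own statement) =====
-- stated objective: idiomatic
-- what changed: B builds a set of stripped lines once and drives the loop over the sections (a dict comprehension querying the set), instead of A's dict.fromkeys followed by a nested lines-by-sections scan.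
import Mathlib
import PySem

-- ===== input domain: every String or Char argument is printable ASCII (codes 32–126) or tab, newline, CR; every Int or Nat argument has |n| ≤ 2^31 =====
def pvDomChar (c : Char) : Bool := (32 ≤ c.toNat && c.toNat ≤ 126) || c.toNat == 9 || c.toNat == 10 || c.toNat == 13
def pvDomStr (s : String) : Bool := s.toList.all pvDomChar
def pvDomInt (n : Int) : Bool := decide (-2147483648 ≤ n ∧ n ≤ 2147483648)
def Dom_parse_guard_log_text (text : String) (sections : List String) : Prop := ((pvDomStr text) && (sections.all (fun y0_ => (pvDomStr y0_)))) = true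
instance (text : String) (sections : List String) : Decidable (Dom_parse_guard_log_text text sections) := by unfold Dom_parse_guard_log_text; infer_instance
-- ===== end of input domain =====

-- B builds the set of stripped lines once and iterates over the sections instead of A's
-- nested lines-by-sections scan; same return value, proved equal on all inputs.


-- ===== PORT A =====
def parse_guard_log_text (text : String) (sections : List String) : List (String × String) :=
  let status : PySem.Dict String String :=
    sections.foldl (fun d s => d.insert s "missing") PySem.Dict.empty
  let status :=
    (PySem.Str.splitlines text).foldl (fun st raw_line =>
      let line := PySem.Str.strip raw_line
      sections.foldl (fun st2 sec =>
        if line = "[guard] " ++ sec then st2.insert sec "seen" else st2) st) status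
  status.items

-- ===== PORT B =====
def parse_guard_log_text_alt (text : String) (sections : List String) : List (String × String) :=
  let observed : PySem.Set String :=
    PySem.Set.ofList ((PySem.Str.splitlines text).map PySem.Str.strip)
  let result : PySem.Dict String String :=
    sections.foldl
      (fun d s => d.insert s (if ("[guard] " ++ s) ∈ observed then "seen" else "missing"))
      PySem.Dict.empty
  result.items

-- ===== PRECONDITION & SPEC =====
def Spec_parse_guard_log_text (text : String) (sections : List String) (out : List (String × String)) : Prop := out = parse_guard_log_text_alt text sections
instance (text : String) (sections : List String) (out : List (String × String)) : Decidable (Spec_parse_guard_log_text text sections out) := by unfold Spec_parse_guard_log_text; infer_instance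

-- ===== CLAIM (what is proved, stated in full; the proofs are below) =====
def Claim_equal_parse_guard_log_text : Prop := ∀ (text : String) (sections : List String), Dom_parse_guard_log_text text sections → Spec_parse_guard_log_text text sections (parse_guard_log_text text sections)

-- ===== LEMMAS AND PROOFS =====

/-- Ordered first-occurrence extension of `S` by `l` (the key order both folds produce). -/
def pvUpd (S l : List String) : List String :=
  l.foldl (fun acc s => if s ∈ acc then acc else acc ++ [s]) S

lemma mem_pvUpd_iff : ∀ (l S : List String) (x : String), x ∈ pvUpd S l ↔ x ∈ S ∨ x ∈ l := by
  intro l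
  induction l with
  | nil => intro S x; simp [pvUpd]
  | cons a rest ih =>
    intro S x
    show x ∈ pvUpd (if a ∈ S then S else S ++ [a]) rest ↔ _
    rw [ih]
    by_cases ha : a ∈ S
    · simp only [if_pos ha, List.mem_cons]
      constructor
      · tauto
      · rintro (h | rfl | h) <;> tauto
    · simp only [if_neg ha, List.mem_cons]
      constructor
      · intro h
        rcases h with h | h
        · simp at h
          rcases h with h | rfl <;> tauto
        · tauto
      · rintro (h | rfl | h) <;> simp [*]

lemma keys_of_items_map {d : PySem.Dict String String} {S : List String} {u : String → String}
    (h : d.items = S.map (fun s => (s, u s))) : d.keys = S := by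
  simp [PySem.Dict.keys, h, List.map_map, Function.comp_def]

lemma contains_of_items_map {d : PySem.Dict String String} {S : List String} {u : String → String}
    (h : d.items = S.map (fun s => (s, u s))) (k : String) :
    d.contains k = decide (k ∈ S) := by
  rw [PySem.Dict.contains_eq_decide_mem_keys, keys_of_items_map h]

lemma items_insert_mem {d : PySem.Dict String String} {S : List String} {u : String → String}
    (h : d.items = S.map (fun s => (s, u s))) {k : String} (hk : k ∈ S) (v : String) :
    (d.insert k v).items = S.map (fun s => (s, if s = k then v else u s)) := by
  have hc : d.contains k = true := by rw [contains_of_items_map h]; simpa using hk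
  rw [PySem.Dict.items_insert_of_contains _ _ hc, h, List.map_map]
  apply List.map_congr_left
  intro s _
  by_cases hsk : s = k <;> simp [Function.comp, hsk]

lemma items_insert_not_mem {d : PySem.Dict String String} {S : List String} {u : String → String}
    (h : d.items = S.map (fun s => (s, u s))) {k : String} (hk : k ∉ S) (v : String) :
    (d.insert k v).items = S.map (fun s => (s, u s)) ++ [(k, v)] := by
  have hc : d.contains k = false := by rw [contains_of_items_map h]; simpa using hk
  rw [PySem.Dict.items_insert_of_not_contains _ _ hc, h]

/-- A fold inserting each key with a value depending only on the key extends the items list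
in first-occurrence order. Covers A's `dict.fromkeys` loop and B's comprehension. -/
lemma foldl_insert_fn (v : String → String) :
    ∀ (l S : List String) (d : PySem.Dict String String),
      d.items = S.map (fun s => (s, v s)) →
      (l.foldl (fun d s => d.insert s (v s)) d).items
        = (pvUpd S l).map (fun s => (s, v s)) := by
  intro l
  induction l with
  | nil => intro S d h; simpa [pvUpd] using h
  | cons a rest ih =>
    intro S d h
    show (rest.foldl _ (d.insert a (v a))).items = (pvUpd (if a ∈ S then S else S ++ [a]) rest).map _
    by_cases ha : a ∈ S
    · rw [if_pos ha]
      apply ih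
      rw [items_insert_mem h ha (v a)]
      apply List.map_congr_left
      intro s _
      by_cases hsa : s = a <;> simp [hsa]
    · rw [if_neg ha]
      apply ih
      rw [items_insert_not_mem h ha (v a)]
      simp
/-- One line of A's scan: the inner fold over `sections` flips every matched section to "seen". -/
lemma inner_fold (line : String) :
    ∀ (l S : List String) (u : String → String) (d : PySem.Dict String String),
      (∀ s ∈ l, s ∈ S) →
      d.items = S.map (fun s => (s, u s)) →
      (l.foldl (fun st2 sec => if line = "[guard] " ++ sec then st2.insert sec "seen" else st2) d).items
        = S.map (fun s => (s, if s ∈ l ∧ line = "[guard] " ++ s then "seen" else u s)) := by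
  intro l
  induction l with
  | nil => intro S u d _ h; simpa using h
  | cons a rest ih =>
    intro S u d hl h
    have haS : a ∈ S := hl a (by simp)
    have hrest : ∀ s ∈ rest, s ∈ S := fun s hs => hl s (by simp [hs])
    show ((rest.foldl _ (if line = "[guard] " ++ a then d.insert a "seen" else d)).items) = _
    by_cases hm : line = "[guard] " ++ a
    · rw [if_pos hm]
      rw [ih S (fun s => if s = a then "seen" else u s) _ hrest (items_insert_mem h haS "seen")]
      apply List.map_congr_left
      intro s _
      by_cases h1 : s ∈ rest ∧ line = "[guard] " ++ s
      · simp [h1]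
      · by_cases hsa : s = a
        · subst hsa
          simp [hm]
        · have : ¬ (s ∈ a :: rest ∧ line = "[guard] " ++ s) := by
            intro ⟨h2, h3⟩
            rcases List.mem_cons.mp h2 with h4 | h4
            · exact hsa h4
            · exact h1 ⟨h4, h3⟩
          simp only [if_neg h1, if_neg this, if_neg hsa]
    · rw [if_neg hm]
      rw [ih S u d hrest h]
      apply List.map_congr_left
      intro s _
      by_cases h1 : s ∈ rest ∧ line = "[guard] " ++ s
      · simp [h1]
      · have : ¬ (s ∈ a :: rest ∧ line = "[guard] " ++ s) := by
          intro ⟨h2, h3⟩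
          rcases List.mem_cons.mp h2 with h4 | h4
          · exact hm (h4 ▸ h3)
          · exact h1 ⟨h4, h3⟩
        simp only [if_neg h1, if_neg this]

/-- A's whole scan: after all lines, a section is "seen" iff some stripped line matches it. -/
lemma outer_fold (sections S : List String)
    (hS1 : ∀ s ∈ sections, s ∈ S) (hS2 : ∀ s ∈ S, s ∈ sections) :
    ∀ (L : List String) (u : String → String) (d : PySem.Dict String String),
      d.items = S.map (fun s => (s, u s)) →
      (L.foldl (fun st raw_line =>
          let line := PySem.Str.strip raw_line
          sections.foldl (fun st2 sec =>
            if line = "[guard] " ++ sec then st2.insert sec "seen" else st2) st) d).items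
        = S.map (fun s => (s, if L.any (fun ln => PySem.Str.strip ln = "[guard] " ++ s) then "seen" else u s)) := by
  intro L
  induction L with
  | nil => intro u d h; simpa using h
  | cons raw rest ih =>
    intro u d h
    show (rest.foldl _ (sections.foldl _ d)).items = _
    rw [ih (fun s => if s ∈ sections ∧ PySem.Str.strip raw = "[guard] " ++ s then "seen" else u s) _
        (inner_fold (PySem.Str.strip raw) sections S u d hS1 h)]
    apply List.map_congr_left
    intro s hs
    have hsec : s ∈ sections := hS2 s hs
    simp only [List.any_cons, Bool.or_eq_true]
    by_cases h1 : rest.any (fun ln => PySem.Str.strip ln = "[guard] " ++ s) = true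
    · simp [h1]
    · by_cases h2 : PySem.Str.strip raw = "[guard] " ++ s
      · simp [h1, h2, hsec]
      · simp [h1, h2]

-- ===== VERDICT (by name: the statement is the Claim_ definition above) =====
theorem parse_guard_log_text_spec : Claim_equal_parse_guard_log_text := by
  intro text sections _
  show parse_guard_log_text text sections = parse_guard_log_text_alt text sections
  unfold parse_guard_log_text parse_guard_log_text_alt
  have hbaseA := foldl_insert_fn (fun _ => "missing") sections [] PySem.Dict.empty (by simp [PySem.Dict.empty])
  have hbaseB := foldl_insert_fn
      (fun s => if ("[guard] " ++ s) ∈ PySem.Set.ofList ((PySem.Str.splitlines text).map PySem.Str.strip)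
                then "seen" else "missing")
      sections [] PySem.Dict.empty (by simp [PySem.Dict.empty])
  rw [outer_fold sections (pvUpd [] sections)
        (fun s hs => (mem_pvUpd_iff sections [] s).mpr (Or.inr hs))
        (fun s hs => by rcases (mem_pvUpd_iff sections [] s).mp hs with h | h
                        · simp at h
                        · exact h)
        (PySem.Str.splitlines text) (fun _ => "missing") _ hbaseA,
      hbaseB]
  apply List.map_congr_left
  intro s _
  have : (("[guard] " ++ s) ∈ PySem.Set.ofList ((PySem.Str.splitlines text).map PySem.Str.strip))
      ↔ ((PySem.Str.splitlines text).any (fun ln => PySem.Str.strip ln = "[guard] " ++ s) = true) := by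
    simp only [PySem.Set.mem_ofList, List.mem_map, List.any_eq_true, decide_eq_true_eq]
  by_cases hmem : ("[guard] " ++ s) ∈ PySem.Set.ofList ((PySem.Str.splitlines text).map PySem.Str.strip)
  · simp [hmem, this.mp hmem]
  · have := (not_iff_not.mpr this).mp hmem
    simp [hmem, this]
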